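-- pv_equiv track=rewrite | github.com/nastyh/LeetCode | Basic Data Structures/Smallest_sum_of_two_nonadjacent_elements.py | smallest_sum_dp
-- ===== SOURCE A (Python) =====
-- import math
--
-- def smallest_sum_dp(nums):  # O(n) both
--     """
--     Need two extra lists:
--     dp is where the answer will be
--     smallest is the list where, staring from the third index, we keep the smallest element from nums that
--     stands to the left from the i-1 element
--     In dp, the first two elements are equal to respective from nums
--     Third is the sum of the previous two
--     After that we start the loop and choose the min
--     """
--     if len(nums) < 3: return None
--     dp = [None] * len(nums)
--     smallest = [math.inf] * len(nums)
--     for i in range(2, len(nums)):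
--         smallest[i] = min(nums[:i - 1])
--
--     # alternative way to do smallest, b/c the above might be not linear
--     # smallest[0], smallest[1] = nums[0], nums[1]
--     # for i in range(2, len(nums)):
--     #     smallest[i] = min(smallest[i - 2], smallest[i - 1])
--     # end of the alternative way
--
--     dp[0], dp[1], dp[2] = nums[0], nums[1], nums[0] + nums[1]
--     for i in range(3, len(nums)):
--         dp[i] = min(nums[i] + smallest[i], nums[i - 1] + nums[i - 1])
--     return dp[-1]
-- ===== SOURCE B (Python) =====
-- def smallest_sum_dp(nums):
--     # Closed form: in A only the final loop iteration's dp value is returned,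
--     # so the answer is determined by the last two elements and min(nums[:-2]).
--     n = len(nums)
--     if n < 3:
--         return None
--     if n == 3:
--         return nums[0] + nums[1]
--     return min(nums[-1] + min(nums[:-2]), 2 * nums[-2])
-- ===== Notes on version B (the rewrite author's own statement) =====
-- stated objective: faster
-- what changed: Replaced A's quadratic construction of the 'smallest' table and the dp loop (whose earlier entries are never read) by a direct O(n) closed form using one min over nums[:-2] and the last two elements.
import Mathlib
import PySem

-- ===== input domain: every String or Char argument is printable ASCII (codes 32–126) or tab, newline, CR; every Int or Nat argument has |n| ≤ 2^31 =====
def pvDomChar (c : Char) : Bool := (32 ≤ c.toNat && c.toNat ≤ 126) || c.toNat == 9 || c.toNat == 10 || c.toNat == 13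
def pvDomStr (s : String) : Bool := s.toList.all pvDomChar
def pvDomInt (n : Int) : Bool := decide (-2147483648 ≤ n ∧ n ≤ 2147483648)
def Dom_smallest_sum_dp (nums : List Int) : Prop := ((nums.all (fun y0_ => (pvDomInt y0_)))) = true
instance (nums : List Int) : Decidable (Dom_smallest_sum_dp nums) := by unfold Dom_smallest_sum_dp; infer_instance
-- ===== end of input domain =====

-- B replaces A's quadratic 'smallest' table and dp loop by an O(n) closed form (objective: faster).

-- ===== PORT A =====
-- math.inf entries of 'smallest' are modelled as `none`; they are never read by the dp loop,
-- which accesses smallest[i] only for i ≥ 3 (always set), extracted with `.getD 0`.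
def smallest_sum_dp (nums : List Int) : Option Int :=
  if nums.length < 3 then none else
  let n : Int := (nums.length : Int)
  let smallest : List (Option Int) :=
    (PySem.List.pyRange 2 n 1).foldl
      (fun s i => s.set i.toNat
        (PySem.List.min? (PySem.List.slice nums (some 0) (some (i - 1))) (fun y => y)))
      (List.replicate nums.length none)
  let dp : List (Option Int) :=
    (((List.replicate nums.length (none : Option Int)).set 0
        (some (PySem.List.pyGetD nums 0 0))).set 1
        (some (PySem.List.pyGetD nums 1 0))).set 2
        (some (PySem.List.pyGetD nums 0 0 + PySem.List.pyGetD nums 1 0))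
  let dp2 : List (Option Int) :=
    (PySem.List.pyRange 3 n 1).foldl
      (fun d i => d.set i.toNat
        (some (min (PySem.List.pyGetD nums i 0 + (PySem.List.pyGetD smallest i none).getD 0)
                   (PySem.List.pyGetD nums (i - 1) 0 + PySem.List.pyGetD nums (i - 1) 0))))
      dp
  PySem.List.pyGetD dp2 (-1) none

-- ===== PORT B =====
def smallest_sum_dp_alt (nums : List Int) : Option Int :=
  if nums.length < 3 then none
  else if nums.length = 3 then
    some (PySem.List.pyGetD nums 0 0 + PySem.List.pyGetD nums 1 0)
  else
    some (min (PySem.List.pyGetD nums (-1) 0 +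
                 ((PySem.List.min? (PySem.List.slice nums none (some (-2))) (fun y => y)).getD 0))
              (2 * PySem.List.pyGetD nums (-2) 0))

-- ===== PRECONDITION & SPEC =====
def Spec_smallest_sum_dp (nums : List Int) (out : Option Int) : Prop := out = smallest_sum_dp_alt nums
instance (nums : List Int) (out : Option Int) : Decidable (Spec_smallest_sum_dp nums out) := by unfold Spec_smallest_sum_dp; infer_instance

-- ===== CLAIM (what is proved, stated in full; the proofs are below) =====
def Claim_equal_smallest_sum_dp : Prop := ∀ (nums : List Int), Dom_smallest_sum_dp nums → Spec_smallest_sum_dp nums (smallest_sum_dp nums)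

-- ===== LEMMAS AND PROOFS =====

-- a foldl of index-sets preserves the list's length
theorem pv_foldl_set_length {α : Type} (l : List Int) (f : Int → α) :
    ∀ (d : List α), (l.foldl (fun d i => d.set i.toNat (f i)) d).length = d.length := by
  induction l with
  | nil => intro d; rfl
  | cons a t ih => intro d; simp [List.foldl, ih]

theorem pv_pyGetD_set {α : Type} (l : List α) (i : Int) (v d : α) (h0 : 0 ≤ i)
    (h1 : i.toNat < l.length) :
    PySem.List.pyGetD (l.set i.toNat v) i d = v := by
  rw [PySem.List.pyGetD_eq_getElem _ _ h0 (by simpa using (by omega : i < (l.length : Int)))]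
  exact List.getElem_set_self _

theorem pv_pyGetD_neg_one_set_last {α : Type} (l : List α) (v d : α) (i : Nat)
    (h0 : l.length ≠ 0) (hi : i = l.length - 1) :
    PySem.List.pyGetD (l.set i v) (-1) d = v := by
  rw [PySem.List.pyGetD_neg_ofNat _ 1 d (by omega) (by simpa using (by omega : 1 ≤ l.length))]
  simp only [List.length_set]
  subst hi
  exact List.getElem_set_self _

theorem pv_main (nums : List Int) (hn : 4 ≤ nums.length) :
    smallest_sum_dp nums = smallest_sum_dp_alt nums := by
  have h3 : ¬ nums.length < 3 := by omega
  have heq : ¬ nums.length = 3 := by omega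
  unfold smallest_sum_dp smallest_sum_dp_alt
  simp only [h3, if_false, heq]
  set N := nums.length with hN
  have hr2 : PySem.List.pyRange 2 (N : Int) 1 = PySem.List.pyRange 2 ((N : Int) - 1) 1 ++ [(N : Int) - 1] := by
    have h := PySem.List.pyRange_one_succ_right (a := 2) (b := (N : Int) - 1) (by omega)
    have e : (N : Int) - 1 + 1 = (N : Int) := by ring
    rw [e] at h; exact h
  have hr3 : PySem.List.pyRange 3 (N : Int) 1 = PySem.List.pyRange 3 ((N : Int) - 1) 1 ++ [(N : Int) - 1] := by
    have h := PySem.List.pyRange_one_succ_right (a := 3) (b := (N : Int) - 1) (by omega)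
    have e : (N : Int) - 1 + 1 = (N : Int) := by ring
    rw [e] at h; exact h
  rw [hr2, hr3, List.foldl_append, List.foldl_append]
  simp only [List.foldl_cons, List.foldl_nil]
  set G := (PySem.List.pyRange 2 ((N : Int) - 1) 1).foldl
      (fun s i => s.set i.toNat
        (PySem.List.min? (PySem.List.slice nums (some 0) (some (i - 1))) (fun y => y)))
      (List.replicate N (none : Option Int)) with hG
  have hlenG : G.length = N := by rw [hG, pv_foldl_set_length]; simp
  rw [pv_pyGetD_set G ((N : Int) - 1) _ none (by omega) (by omega)]
  set F := (PySem.List.pyRange 3 ((N : Int) - 1) 1).foldl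
      (fun d i => d.set i.toNat
        (some (min (PySem.List.pyGetD nums i 0 +
            (PySem.List.pyGetD (G.set ((N : Int) - 1).toNat
              (PySem.List.min? (PySem.List.slice nums (some 0) (some ((N : Int) - 1 - 1))) (fun y => y)))
              i (none : Option Int)).getD 0)
                   (PySem.List.pyGetD nums (i - 1) 0 + PySem.List.pyGetD nums (i - 1) 0))))
      ((((List.replicate N (none : Option Int)).set 0
        (some (PySem.List.pyGetD nums 0 0))).set 1
        (some (PySem.List.pyGetD nums 1 0))).set 2
        (some (PySem.List.pyGetD nums 0 0 + PySem.List.pyGetD nums 1 0))) with hF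
  have hlenF : F.length = N := by rw [hF, pv_foldl_set_length]; simp
  rw [pv_pyGetD_neg_one_set_last F _ none ((N : Int) - 1).toNat (by omega) (by omega)]
  -- both sides are now closed forms over nums; align indices and slices
  rw [show ((N : Int) - 1 - 1) = ((N - 2 : Nat) : Int) by omega,
      show ((N : Int) - 1) = ((N - 1 : Nat) : Int) by omega]
  rw [PySem.List.slice_zero_start, PySem.List.slice_to_natCast,
      PySem.List.slice_to_neg_ofNat nums 2 (by omega),
      PySem.List.pyGetD_neg_ofNat nums 1 0 (by omega) (by omega),
      PySem.List.pyGetD_neg_ofNat nums 2 0 (by omega) (by omega)]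
  simp only [PySem.List.pyGetD_natCast]
  rw [List.getD_eq_getElem nums 0 (by omega), List.getD_eq_getElem nums 0 (by omega), two_mul]

-- ===== VERDICT (by name: the statement is the Claim_ definition above) =====
theorem smallest_sum_dp_spec : Claim_equal_smallest_sum_dp := by
  intro nums _
  unfold Spec_smallest_sum_dp
  by_cases h3 : nums.length < 3
  · unfold smallest_sum_dp smallest_sum_dp_alt; simp [h3]
  · by_cases heq : nums.length = 3
    · match nums, heq with
      | [a, b, c], _ =>
        unfold smallest_sum_dp smallest_sum_dp_alt
        simp [PySem.List.pyRange_one_cons (by norm_num : (2 : Int) < 3),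
              PySem.List.pyRange_one_eq_nil (by norm_num : (3 : Int) ≤ 3),
              PySem.List.pyGetD, PySem.List.pyGet?_neg_one]
    · exact pv_main nums (by omega)
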